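-- pv_equiv track=rewrite | github.com/Lucasaboredo/PARCIAL-1 | punto_dos.py | contar_especies
-- ===== SOURCE A (Python) =====
-- class Stack:
--
--     def __init__(self):
--         self.__elements = []
--
--     def push(self, element):
--         self.__elements.append(element)
--
--     def pop(self):
--         if len(self.__elements) > 0:
--             return self.__elements.pop()
--         else:
--             return None
--
--     def on_top(self):
--         if len(self.__elements) > 0:
--             return self.__elements[-1]
--         else:
--             return None
--
--     def size(self):
--         return len(self.__elements)
--
-- def contar_especies(lista):
--     pila = Stack()
--     for dinosaurio in lista:
--         pila.push(dinosaurio)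
--     especies = set()
--     while pila.size() > 0:
--         dinosaurio = pila.pop()
--         especies.add(dinosaurio["especie"])
--     return len(especies)
-- ===== SOURCE B (Python) =====
-- def contar_especies(lista):
--     return len({d["especie"] for d in lista})
-- ===== Notes on version B (the rewrite author's own statement) =====
-- stated objective: simpler
-- what changed: Drops the Stack class and the push/drain two-pass loop: B computes the answer in one pass as the length of a set comprehension over the list.
-- outside the precondition, e.g. on contar_especies([{'nombre': 'rex'}]): A raises KeyError, B raises KeyError
import Mathlib
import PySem

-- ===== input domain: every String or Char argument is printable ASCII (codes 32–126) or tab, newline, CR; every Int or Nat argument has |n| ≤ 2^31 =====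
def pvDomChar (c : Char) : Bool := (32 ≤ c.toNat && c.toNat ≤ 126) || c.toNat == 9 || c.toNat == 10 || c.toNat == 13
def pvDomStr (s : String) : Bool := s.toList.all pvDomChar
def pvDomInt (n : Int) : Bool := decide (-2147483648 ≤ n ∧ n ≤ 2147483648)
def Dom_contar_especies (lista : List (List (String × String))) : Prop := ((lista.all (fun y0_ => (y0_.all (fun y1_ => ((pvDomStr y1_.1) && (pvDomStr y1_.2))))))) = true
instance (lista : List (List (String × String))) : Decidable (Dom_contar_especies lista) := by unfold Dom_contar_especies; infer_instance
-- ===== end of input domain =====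

-- B replaces A's Stack class and its push-then-drain two-pass loop by a single
-- set comprehension; equal return value proved on inputs where every dict has
-- the key "especie" (elsewhere Python raises KeyError).

-- d["especie"]: first-match association-list lookup (dict convention), total
-- under Pre_; "" is never reached on admitted inputs.
def especieDe (d : List (String × String)) : String :=
  ((d.find? (fun kv => kv.1 == "especie")).map (·.2)).getD ""

-- ===== PORT A =====
def contar_especies (lista : List (List (String × String))) : Int :=
  -- push every element onto the stack (head = top)
  let pila : List (List (String × String)) := lista.foldl (fun st d => d :: st) []
  -- pop until empty, adding d["especie"] to the set
  let especies : PySem.Set String := pila.foldl (fun s d => PySem.Set.add s (especieDe d)) PySem.Set.empty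
  PySem.Set.len especies

-- ===== PORT B =====
def contar_especies_alt (lista : List (List (String × String))) : Int :=
  PySem.Set.len (PySem.Set.ofList (lista.map (fun d => especieDe d)))

-- ===== PRECONDITION & SPEC =====
-- Pre_: every dict carries the key "especie"; on a dict without it A raises KeyError.
def Pre_contar_especies (lista : List (List (String × String))) : Prop :=
  (lista.all (fun d => d.any (fun kv => kv.1 == "especie"))) = true
instance (lista : List (List (String × String))) : Decidable (Pre_contar_especies lista) := by unfold Pre_contar_especies; infer_instance

def pvWitness_contar_especies : (List (List (String × String))) :=
  [[("especie", "rex"), ("nombre", "t")], [("especie", "raptor")], [("especie", "rex")]]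

def Spec_contar_especies (lista : List (List (String × String))) (out : Int) : Prop := out = contar_especies_alt lista
instance (lista : List (List (String × String))) (out : Int) : Decidable (Spec_contar_especies lista out) := by unfold Spec_contar_especies; infer_instance

-- ===== CLAIM (what is proved, stated in full; the proofs are below) =====
def Claim_equal_contar_especies : Prop := ∀ (lista : List (List (String × String))), Dom_contar_especies lista → Pre_contar_especies lista → Spec_contar_especies lista (contar_especies lista)

-- ===== LEMMAS AND PROOFS =====

-- two nodup lists with the same members have the same length
lemma len_eq_of_nodup_of_mem_iff {α : Type} [DecidableEq α] (xs ys : List α)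
    (hx : xs.Nodup) (hy : ys.Nodup) (h : ∀ a, a ∈ xs ↔ a ∈ ys) :
    xs.length = ys.length := by
  rw [← List.toFinset_card_of_nodup hx, ← List.toFinset_card_of_nodup hy]
  congr 1
  ext a
  simp [h a]

lemma set_len_ofList_reverse {α : Type} [DecidableEq α] (xs : List α) :
    (PySem.Set.ofList xs.reverse : List α).length = (PySem.Set.ofList xs : List α).length := by
  apply len_eq_of_nodup_of_mem_iff
  · exact PySem.Set.nodup_ofList _
  · exact PySem.Set.nodup_ofList _
  · intro a
    simp [PySem.Set.mem_ofList]

lemma foldl_cons_eq_reverse {α : Type} (xs acc : List α) :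
    xs.foldl (fun st d => d :: st) acc = xs.reverse ++ acc := by
  induction xs generalizing acc with
  | nil => simp
  | cons x xs ih => simp [List.foldl_cons, ih]

-- ===== VERDICT (by name: the statement is the Claim_ definition above) =====
theorem contar_especies_spec : Claim_equal_contar_especies := by
  intro lista _ _
  unfold Spec_contar_especies contar_especies contar_especies_alt
  have h1 : lista.foldl (fun st d => d :: st) ([] : List (List (String × String))) = lista.reverse := by
    simp [foldl_cons_eq_reverse lista []]
  have h2 : ∀ (l : List (List (String × String))) (s : PySem.Set String),
      l.foldl (fun s d => PySem.Set.add s (especieDe d)) s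
        = (l.map (fun d => especieDe d)).foldl PySem.Set.add s := by
    intro l s; rw [List.foldl_map]
  simp only [h1, h2]
  show (PySem.Set.len (PySem.Set.ofList (lista.reverse.map (fun d => especieDe d))) : Int) = _
  unfold PySem.Set.len
  rw [List.map_reverse, set_len_ofList_reverse]
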